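-- pv_equiv track=rewrite | github.com/fapablazacl/OpenGL-Hpp | oglhpp/util.py | split_capitalized
-- ===== SOURCE A (Python) =====
-- def is_capitalized(value):
--     if value == '':
--         return False
--
--     state = 0   # 0: uppercase part. 1: lowercase part
--
--     for ch in value:
--         if state == 0:
--             if str.isupper(ch):
--                 state = 1
--             else:
--                 return False
--         elif state == 1:
--             if str.isupper(ch):
--                 continue
--             elif str.islower(ch):
--                 state = 2
--             else:
--                 return False
--         elif state == 2:
--             if not str.islower(ch):
--                 return False
--
--     return True
--
-- def split_capitalized(value):
--     entries = []
--
--     current = ''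
--     current_i = 0
--     for i in range(len(value)):
--         ch = value[i]
--
--         if is_capitalized(current) and not is_capitalized(current + ch):
--             entries.append(current)
--             current = ''
--             current_i = i
--
--         current += ch
--
--     entries.append(value[current_i:])
--
--     return entries
-- ===== SOURCE B (Python) =====
-- def split_capitalized(value):
--     # One left-to-right pass; state tracks whether the current segment is an
--     # uppercase run (1), an uppercase-then-lowercase run (2), or dead (0).
--     entries = []
--     cur = ''
--     state = 0
--     for ch in value:
--         if cur == '':
--             state = 1 if ch.isupper() else 0
--             cur = ch
--         elif state == 1:
--             if ch.isupper():
--                 cur += ch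
--             elif ch.islower():
--                 cur += ch
--                 state = 2
--             else:
--                 entries.append(cur)
--                 cur = ch
--                 state = 0
--         elif state == 2:
--             if ch.islower():
--                 cur += ch
--             else:
--                 entries.append(cur)
--                 cur = ch
--                 state = 1 if ch.isupper() else 0
--         else:
--             cur += ch
--     entries.append(cur)
--     return entries
-- ===== Notes on version B (the rewrite author's own statement) =====
-- stated objective: faster
-- what changed: B replaces A's re-validation of the whole growing chunk via is_capitalized at every character (quadratic on long capitalized chunks) with a single left-to-right pass that keeps the chunk's capitalization state (uppercase run / upper-then-lower run / dead) incrementally and cuts at break points.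
import Mathlib
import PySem

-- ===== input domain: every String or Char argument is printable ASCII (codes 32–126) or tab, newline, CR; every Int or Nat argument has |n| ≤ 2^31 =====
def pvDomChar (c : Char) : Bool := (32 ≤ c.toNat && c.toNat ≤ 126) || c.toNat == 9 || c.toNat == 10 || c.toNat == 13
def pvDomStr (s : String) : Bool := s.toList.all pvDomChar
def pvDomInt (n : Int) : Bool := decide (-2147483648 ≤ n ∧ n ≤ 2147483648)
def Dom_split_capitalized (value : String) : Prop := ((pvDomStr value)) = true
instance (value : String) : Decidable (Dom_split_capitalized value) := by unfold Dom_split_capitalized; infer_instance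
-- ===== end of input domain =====

-- B replaces A's re-scan of the whole current chunk at every character (via is_capitalized)
-- by a single pass that keeps the chunk's capitalization state incrementally; return values only.

-- ===== PORT A =====
-- A's is_capitalized state machine over the chars of value (state 0/1/2, early 'return False' = false)
def isCapLoop : Nat → List Char → Bool
  | _, [] => true
  | 0, ch :: rest => if PySem.Chars.isupper ch then isCapLoop 1 rest else false
  | 1, ch :: rest =>
      if PySem.Chars.isupper ch then isCapLoop 1 rest
      else if PySem.Chars.islower ch then isCapLoop 2 rest
      else false
  | _+2, ch :: rest => if ¬ PySem.Chars.islower ch then false else isCapLoop 2 rest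

-- is_capitalized(value), with value kept as a List Char (Python strings are ported as char lists)
def isCap (cs : List Char) : Bool := if cs = [] then false else isCapLoop 0 cs

-- A's 'for i in range(len(value))' loop: structural recursion over the chars with the index i
-- carried along; state = (entries, current, current_i), strings as char lists.
def aLoop : List Char → Nat → List (List Char) × List Char × Nat → List (List Char) × List Char × Nat
  | [], _, st => st
  | ch :: rest, i, (entries, current, current_i) =>
      if isCap current && !(isCap (current ++ [ch])) then
        aLoop rest (i + 1) (entries ++ [current], [ch], i)      -- append, reset, current_i = i, then current += ch
      else
        aLoop rest (i + 1) (entries, current ++ [ch], current_i)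

def split_capitalized (value : String) : List String :=
  let chars := value.toList
  let st := aLoop chars 0 ([], [], 0)
  -- value[current_i:] with 0 ≤ current_i is List.drop (PySem.List.slice_from); ''.mk rebuilds the strings
  ((st.1 ++ [chars.drop st.2.2]).map String.ofList)

-- ===== PORT B =====
-- B's single pass: state 1 = uppercase run, 2 = uppercase-then-lowercase run, 0 = dead chunk
def bLoop : List Char → List (List Char) × List Char × Nat → List (List Char) × List Char × Nat
  | [], st => st
  | ch :: rest, (entries, cur, state) =>
      bLoop rest
        (if cur = [] then (entries, [ch], if PySem.Chars.isupper ch then 1 else 0)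
         else if state = 1 then
           if PySem.Chars.isupper ch then (entries, cur ++ [ch], 1)
           else if PySem.Chars.islower ch then (entries, cur ++ [ch], 2)
           else (entries ++ [cur], [ch], 0)
         else if state = 2 then
           if PySem.Chars.islower ch then (entries, cur ++ [ch], 2)
           else (entries ++ [cur], [ch], if PySem.Chars.isupper ch then 1 else 0)
         else (entries, cur ++ [ch], state))

def split_capitalized_alt (value : String) : List String :=
  let st := bLoop value.toList ([], [], 0)
  (st.1 ++ [st.2.1]).map String.ofList

-- ===== PRECONDITION & SPEC =====
def Spec_split_capitalized (value : String) (out : List String) : Prop := out = split_capitalized_alt value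
instance (value : String) (out : List String) : Decidable (Spec_split_capitalized value out) := by unfold Spec_split_capitalized; infer_instance

-- ===== CLAIM (what is proved, stated in full; the proofs are below) =====
def Claim_equal_split_capitalized : Prop := ∀ (value : String), Dom_split_capitalized value → Spec_split_capitalized value (split_capitalized value)

-- ===== LEMMAS AND PROOFS =====

-- partial run of A's state machine: the state after consuming cs, none = would 'return False'
def runState (s : Nat) : List Char → Option Nat
  | [] => some s
  | ch :: rest =>
      match s with
      | 0 => if PySem.Chars.isupper ch then runState 1 rest else none
      | 1 => if PySem.Chars.isupper ch then runState 1 rest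
             else if PySem.Chars.islower ch then runState 2 rest
             else none
      | _+2 => if ¬ PySem.Chars.islower ch then none else runState 2 rest

lemma isCapLoop_eq_runState (cs : List Char) : ∀ s, isCapLoop s cs = (runState s cs).isSome := by
  induction cs with
  | nil => intro s; cases s with
    | zero => rfl
    | succ n => cases n <;> rfl
  | cons ch rest ih =>
    intro s
    match s with
    | 0 => simp only [isCapLoop, runState]; split_ifs <;> simp [ih]
    | 1 => simp only [isCapLoop, runState]; split_ifs <;> simp [ih]
    | n+2 => simp only [isCapLoop, runState]; split_ifs <;> simp [ih]

lemma runState_append_singleton (cs : List Char) (ch : Char) : ∀ s,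
    runState s (cs ++ [ch]) = (runState s cs).bind (fun s' => runState s' [ch]) := by
  induction cs with
  | nil => intro s; rfl
  | cons c rest ih =>
    intro s
    match s with
    | 0 =>
      show (if PySem.Chars.isupper c = true then runState 1 (rest ++ [ch]) else none) =
        (if PySem.Chars.isupper c = true then runState 1 rest else none).bind
          (fun s' => runState s' [ch])
      split_ifs
      · exact ih 1
      · rfl
    | 1 =>
      show (if PySem.Chars.isupper c = true then runState 1 (rest ++ [ch])
            else if PySem.Chars.islower c = true then runState 2 (rest ++ [ch]) else none) =
        (if PySem.Chars.isupper c = true then runState 1 rest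
         else if PySem.Chars.islower c = true then runState 2 rest else none).bind
          (fun s' => runState s' [ch])
      split_ifs
      · exact ih 1
      · exact ih 2
      · rfl
    | n+2 =>
      show (if ¬ PySem.Chars.islower c = true then none else runState 2 (rest ++ [ch])) =
        (if ¬ PySem.Chars.islower c = true then none else runState 2 rest).bind
          (fun s' => runState s' [ch])
      split_ifs
      · exact ih 2
      · rfl

-- B's state invariant: the relation between cur and B's state variable
def SegRel (cur : List Char) (state : Nat) : Prop :=
  cur = [] ∨
  (state = 1 ∧ runState 0 cur = some 1) ∨
  (state = 2 ∧ runState 0 cur = some 2) ∨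
  (state = 0 ∧ cur ≠ [] ∧ runState 0 cur = none)

lemma isCap_ne_nil (cs : List Char) (h : cs ≠ []) : isCap cs = (runState 0 cs).isSome := by
  simp [isCap, h, isCapLoop_eq_runState]

-- one-step unfoldings of the two loops (definitional)
lemma aLoop_cons (ch : Char) (rest : List Char) (i : Nat) (e : List (List Char))
    (c : List Char) (ci : Nat) :
    aLoop (ch :: rest) i (e, c, ci) =
      if isCap c && !(isCap (c ++ [ch])) then aLoop rest (i + 1) (e ++ [c], [ch], i)
      else aLoop rest (i + 1) (e, c ++ [ch], ci) := rfl

lemma bLoop_cons (ch : Char) (rest : List Char) (e : List (List Char))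
    (c : List Char) (st : Nat) :
    bLoop (ch :: rest) (e, c, st) =
      bLoop rest
        (if c = [] then (e, [ch], if PySem.Chars.isupper ch then 1 else 0)
         else if st = 1 then
           if PySem.Chars.isupper ch then (e, c ++ [ch], 1)
           else if PySem.Chars.islower ch then (e, c ++ [ch], 2)
           else (e ++ [c], [ch], 0)
         else if st = 2 then
           if PySem.Chars.islower ch then (e, c ++ [ch], 2)
           else (e ++ [c], [ch], if PySem.Chars.isupper ch then 1 else 0)
         else (e, c ++ [ch], st)) := rfl

lemma aLoop_eq_bLoop (chars : List Char) : ∀ (rest : List Char) (i : Nat)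
    (entries : List (List Char)) (cur : List Char) (state : Nat) (ci : Nat),
    SegRel cur state → chars.drop i = rest → chars.drop ci = cur ++ rest →
    (aLoop rest i (entries, cur, ci)).1 = (bLoop rest (entries, cur, state)).1 ∧
    (aLoop rest i (entries, cur, ci)).2.1 = (bLoop rest (entries, cur, state)).2.1 ∧
    chars.drop (aLoop rest i (entries, cur, ci)).2.2 = (aLoop rest i (entries, cur, ci)).2.1 := by
  intro rest
  induction rest with
  | nil =>
    intro i entries cur state ci _ _ hci
    simpa [aLoop, bLoop] using hci
  | cons ch rest' ih =>
    intro i entries cur state ci hrel hi hci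
    have hi' : chars.drop (i + 1) = rest' := by
      rw [← List.tail_drop, hi, List.tail_cons]
    have hich : chars.drop i = [ch] ++ rest' := by simpa using hi
    rcases hrel with hnil | ⟨hs, hrun⟩ | ⟨hs, hrun⟩ | ⟨hs, hne, hrun⟩
    · -- cur = []: A never cuts (isCap [] = false), B takes the first branch
      subst hnil
      have hcut : (isCap [] && !(isCap ([] ++ [ch]))) = false := by simp [isCap]
      rw [aLoop_cons, bLoop_cons, hcut, if_pos rfl]
      simp only [Bool.false_eq_true, if_false, List.nil_append]
      by_cases hu : PySem.Chars.isupper ch = true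
      · rw [if_pos hu]
        exact ih (i+1) entries [ch] 1 ci (Or.inr (Or.inl ⟨rfl, by simp [runState, hu]⟩)) hi'
          (by simpa using hci)
      · rw [if_neg hu]
        exact ih (i+1) entries [ch] 0 ci
          (Or.inr (Or.inr (Or.inr ⟨rfl, by simp, by simp [runState, hu]⟩))) hi'
          (by simpa using hci)
    · -- state 1: cur is a nonempty uppercase run
      subst hs
      have hne : cur ≠ [] := by
        intro h; rw [h] at hrun; simp [runState] at hrun
      have hc1 : isCap cur = true := by rw [isCap_ne_nil cur hne, hrun]; rfl
      have hc2 : isCap (cur ++ [ch]) =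
          (PySem.Chars.isupper ch || PySem.Chars.islower ch) := by
        rw [isCap_ne_nil _ (by simp), runState_append_singleton, hrun]
        by_cases hu : PySem.Chars.isupper ch = true <;>
          by_cases hl : PySem.Chars.islower ch = true <;>
            simp [runState, hu, hl]
      rw [aLoop_cons, bLoop_cons, if_neg hne, if_pos rfl]
      by_cases hu : PySem.Chars.isupper ch = true
      · have hcut : (isCap cur && !(isCap (cur ++ [ch]))) = false := by simp [hc1, hc2, hu]
        rw [hcut, if_pos hu]
        simp only [Bool.false_eq_true, if_false]
        refine ih (i+1) entries (cur ++ [ch]) 1 ci ?_ hi' (by simp [hci])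
        refine Or.inr (Or.inl ⟨rfl, ?_⟩)
        rw [runState_append_singleton, hrun]; simp [runState, hu]
      · by_cases hl : PySem.Chars.islower ch = true
        · have hcut : (isCap cur && !(isCap (cur ++ [ch]))) = false := by simp [hc1, hc2, hl]
          rw [hcut, if_neg hu, if_pos hl]
          simp only [Bool.false_eq_true, if_false]
          refine ih (i+1) entries (cur ++ [ch]) 2 ci ?_ hi' (by simp [hci])
          refine Or.inr (Or.inr (Or.inl ⟨rfl, ?_⟩))
          rw [runState_append_singleton, hrun]; simp [runState, hu, hl]
        · have hcut : (isCap cur && !(isCap (cur ++ [ch]))) = true := by simp [hc1, hc2, hu, hl]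
          rw [hcut, if_neg hu, if_neg hl, if_pos rfl]
          exact ih (i+1) (entries ++ [cur]) [ch] 0 i
            (Or.inr (Or.inr (Or.inr ⟨rfl, by simp, by simp [runState, hu]⟩))) hi' hich
    · -- state 2: cur is uppercase-then-lowercase
      subst hs
      have hne : cur ≠ [] := by
        intro h; rw [h] at hrun; simp [runState] at hrun
      have hc1 : isCap cur = true := by rw [isCap_ne_nil cur hne, hrun]; rfl
      have hc2 : isCap (cur ++ [ch]) = PySem.Chars.islower ch := by
        rw [isCap_ne_nil _ (by simp), runState_append_singleton, hrun]
        by_cases hl : PySem.Chars.islower ch = true <;> simp [runState, hl]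
      rw [aLoop_cons, bLoop_cons, if_neg hne, if_neg (by decide : ¬ ((2:Nat) = 1)), if_pos rfl]
      by_cases hl : PySem.Chars.islower ch = true
      · have hcut : (isCap cur && !(isCap (cur ++ [ch]))) = false := by simp [hc1, hc2, hl]
        rw [hcut, if_pos hl]
        simp only [Bool.false_eq_true, if_false]
        refine ih (i+1) entries (cur ++ [ch]) 2 ci ?_ hi' (by simp [hci])
        refine Or.inr (Or.inr (Or.inl ⟨rfl, ?_⟩))
        rw [runState_append_singleton, hrun]; simp [runState, hl]
      · have hcut : (isCap cur && !(isCap (cur ++ [ch]))) = true := by simp [hc1, hc2, hl]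
        rw [hcut, if_neg hl, if_pos rfl]
        by_cases hu : PySem.Chars.isupper ch = true
        · rw [if_pos hu]
          exact ih (i+1) (entries ++ [cur]) [ch] 1 i
            (Or.inr (Or.inl ⟨rfl, by simp [runState, hu]⟩)) hi' hich
        · rw [if_neg hu]
          exact ih (i+1) (entries ++ [cur]) [ch] 0 i
            (Or.inr (Or.inr (Or.inr ⟨rfl, by simp, by simp [runState, hu]⟩))) hi' hich
    · -- state 0: dead chunk, neither side ever cuts again
      subst hs
      have hc1 : isCap cur = false := by rw [isCap_ne_nil cur hne, hrun]; rfl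
      have hcut : (isCap cur && !(isCap (cur ++ [ch]))) = false := by simp [hc1]
      rw [aLoop_cons, bLoop_cons, hcut, if_neg hne, if_neg (by decide : ¬ ((0:Nat) = 1)),
        if_neg (by decide : ¬ ((0:Nat) = 2))]
      simp only [Bool.false_eq_true, if_false]
      refine ih (i+1) entries (cur ++ [ch]) 0 ci ?_ hi' (by simp [hci])
      refine Or.inr (Or.inr (Or.inr ⟨rfl, by simp, ?_⟩))
      rw [runState_append_singleton, hrun]; rfl

-- ===== VERDICT (by name: the statement is the Claim_ definition above) =====
theorem split_capitalized_spec : Claim_equal_split_capitalized := by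
  intro value _
  unfold Spec_split_capitalized split_capitalized split_capitalized_alt
  have h := aLoop_eq_bLoop value.toList value.toList 0 [] [] 0 0 (Or.inl rfl) (by simp) (by simp)
  show List.map String.ofList ((aLoop value.toList 0 ([], [], 0)).1 ++
      [List.drop (aLoop value.toList 0 ([], [], 0)).2.2 value.toList]) =
    List.map String.ofList ((bLoop value.toList ([], [], 0)).1 ++ [(bLoop value.toList ([], [], 0)).2.1])
  rw [h.2.2, h.1, h.2.1]
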